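-- pv_equiv track=rewrite | github.com/rzAlejandro/Practicas-Universidad | Practicas-Algebra-Computacional/actividad8.py | multiplicar_pot_u
-- ===== SOURCE A (Python) =====
-- def multiplicar_pot_u(p,exp):     #p esta en Z../<u^2n1 + 1>.
--     n1_d,s = len(p), 1  #s: signo por si u^2n1 + k = -u^k (u^2n1 = -1)
--     l = [0]*n1_d
--     exp = exp % (2*n1_d)   #u^4n1 = 1
--     if exp >= n1_d:  #u^2n1 = -1 => u^2n1+k = -u^k
--         exp, s = exp - n1_d, -1
--     for i in range(n1_d):
--         if i - exp < 0:   #desbordan los exp ultimos elementos, aplicar modulo => pasan restando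
--             l[i] = -s*p[n1_d - exp + i]
--         else:
--             l[i] = s*p[i - exp]
--     return l
-- ===== SOURCE B (Python) =====
-- def multiplicar_pot_u(p, exp):
--     # Iterate the primitive "multiply by u" step (prepend negated last
--     # coefficient, drop the last) exp mod 2n times in the negacyclic ring.
--     l = list(p)
--     for _ in range(exp % (2 * len(p))):
--         l = [-l[-1]] + l[:-1]
--     return l
-- ===== Notes on version B (the rewrite author's own statement) =====
-- stated objective: alternative
-- what changed: Instead of A's single-pass indexed gather with wrap/sign arithmetic per index, B iterates the primitive multiply-by-u step (prepend the negated last coefficient, drop the last) exp mod 2n times.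
-- outside the precondition, e.g. on multiplicar_pot_u([], 3): A raises ZeroDivisionError, B raises ZeroDivisionError
import Mathlib
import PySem

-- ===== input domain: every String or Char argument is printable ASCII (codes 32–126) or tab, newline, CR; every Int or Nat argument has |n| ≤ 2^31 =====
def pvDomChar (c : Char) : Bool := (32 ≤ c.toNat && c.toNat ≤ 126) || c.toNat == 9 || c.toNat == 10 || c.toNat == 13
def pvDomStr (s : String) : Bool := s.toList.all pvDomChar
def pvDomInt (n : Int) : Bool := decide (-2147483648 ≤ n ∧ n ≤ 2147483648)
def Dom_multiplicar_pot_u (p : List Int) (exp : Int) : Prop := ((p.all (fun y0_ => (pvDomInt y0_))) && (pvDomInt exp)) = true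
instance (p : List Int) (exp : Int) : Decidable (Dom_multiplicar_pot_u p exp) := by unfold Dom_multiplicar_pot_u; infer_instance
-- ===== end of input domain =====

-- B replaces A's single-pass indexed gather (wrap/sign arithmetic per index) by iterating
-- the primitive multiply-by-u step (prepend negated last element, drop last) exp mod 2n
-- times. Objective: alternative (not faster).

-- ===== PORT A =====
-- literal port of A's for-loop: result is l[i] for i in range(n1_d); indices into p are
-- always in range when p ≠ [] (Pre_), so pyGetD _ _ 0 is exact there.
def multiplicar_pot_u (p : List Int) (exp : Int) : List Int :=
  let n1_d : Int := p.length
  let e0 := PySem.Int.mod exp (2 * n1_d)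
  let es : Int × Int := if e0 ≥ n1_d then (e0 - n1_d, -1) else (e0, 1)
  (PySem.List.pyRange 0 n1_d 1).map (fun i =>
    if i - es.1 < 0 then -es.2 * PySem.List.pyGetD p (n1_d - es.1 + i) 0
    else es.2 * PySem.List.pyGetD p (i - es.1) 0)

-- ===== PORT B =====
-- one multiply-by-u step: l = [-l[-1]] + l[:-1]
def mpu_step (l : List Int) : List Int :=
  [-(PySem.List.pyGetD l (-1) 0)] ++ PySem.List.slice l none (some (-1))

def multiplicar_pot_u_alt (p : List Int) (exp : Int) : List Int :=
  (PySem.List.pyRange 0 (PySem.Int.mod exp (2 * (p.length : Int))) 1).foldl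
    (fun l _ => mpu_step l) p

-- ===== PRECONDITION & SPEC =====
-- Pre_ excludes only p = [], on which A (and B) raise ZeroDivisionError at 'exp % (2*len(p))'.
def Pre_multiplicar_pot_u (p : List Int) (exp : Int) : Prop := p ≠ []
instance (p : List Int) (exp : Int) : Decidable (Pre_multiplicar_pot_u p exp) := by unfold Pre_multiplicar_pot_u; infer_instance
def pvWitness_multiplicar_pot_u : List Int × Int := ([1, 2, 3], 4)

def Spec_multiplicar_pot_u (p : List Int) (exp : Int) (out : List Int) : Prop := out = multiplicar_pot_u_alt p exp
instance (p : List Int) (exp : Int) (out : List Int) : Decidable (Spec_multiplicar_pot_u p exp out) := by unfold Spec_multiplicar_pot_u; infer_instance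

-- ===== CLAIM (what is proved, stated in full; the proofs are below) =====
def Claim_equal_multiplicar_pot_u : Prop := ∀ (p : List Int) (exp : Int), Dom_multiplicar_pot_u p exp → Pre_multiplicar_pot_u p exp → Spec_multiplicar_pot_u p exp (multiplicar_pot_u p exp)

-- ===== LEMMAS AND PROOFS =====

-- normal form both sides are reduced to: wrapped tail negated-signed, then head signed
def mpuF (p : List Int) (e s : Int) : List Int :=
  (p.drop ((p.length : Int) - e).toNat).map (fun x => -s * x)
    ++ (p.take ((p.length : Int) - e).toNat).map (fun x => s * x)

theorem mpuF_zero (p : List Int) : mpuF p 0 1 = p := by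
  simp [mpuF]

theorem mpuF_wrap (p : List Int) (s : Int) : mpuF p (p.length : Int) s = mpuF p 0 (-s) := by
  simp [mpuF]

-- one step advances e by one (same sign), for 0 ≤ e < n and p nonempty
theorem mpu_step_F (p : List Int) (e s : Int) (hp : p ≠ [])
    (h0 : 0 ≤ e) (h1 : e < (p.length : Int)) :
    mpu_step (mpuF p e s) = mpuF p (e + 1) s := by
  have hplen : 0 < p.length := List.length_pos_iff.mpr hp
  set k : Nat := ((p.length : Int) - (e + 1)).toNat with hk
  have hmeq : ((p.length : Int) - e).toNat = k + 1 := by omega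
  have hkn : k < p.length := by omega
  have htake : p.take (k + 1) = p.take k ++ [p[k]] := by
    rw [List.take_add_one]
    simp [List.getElem?_eq_getElem hkn]
  have hdropc : p.drop k = p[k] :: p.drop (k + 1) := (List.getElem_cons_drop hkn).symm
  have hF : mpuF p e s =
      ((p.drop (k + 1)).map (fun x => -s * x) ++ (p.take k).map (fun x => s * x))
        ++ [s * p[k]] := by
    simp only [mpuF, hmeq, htake, List.map_append, List.map_cons, List.map_nil]
    simp [List.append_assoc]
  have hlast : PySem.List.pyGetD (mpuF p e s) (-1) 0 = s * p[k] := by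
    rw [hF]
    exact PySem.List.pyGetD_neg_one_append_singleton _ _ _
  have hdl : PySem.List.slice (mpuF p e s) none (some (-1)) =
      (p.drop (k + 1)).map (fun x => -s * x) ++ (p.take k).map (fun x => s * x) := by
    rw [PySem.List.slice_to_neg_one, hF, List.dropLast_concat]
  rw [mpu_step, hlast, hdl]
  simp only [mpuF, ← hk, hdropc, List.map_cons, List.cons_append, List.nil_append,
    neg_mul]

-- fold of a constant-step function over any list is iteration
theorem foldl_const_iterate (xs : List Int) (l : List Int) :
    xs.foldl (fun a _ => mpu_step a) l = mpu_step^[xs.length] l := by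
  induction xs generalizing l with
  | nil => rfl
  | cons x xs ih => simp [List.foldl_cons, ih, Function.iterate_succ_apply]

-- invariant: after j steps (j < 2n) we are at mpuF with e = j mod-n style, s by half
theorem iterate_mpu_step (p : List Int) (hp : p ≠ []) :
    ∀ (j : Nat), (j : Int) < 2 * (p.length : Int) →
      mpu_step^[j] p =
        if (j : Int) < (p.length : Int) then mpuF p (j : Int) 1
        else mpuF p ((j : Int) - (p.length : Int)) (-1) := by
  have hplen : 0 < p.length := List.length_pos_iff.mpr hp
  intro j
  induction j with
  | zero =>
    intro _
    rw [if_pos (by exact_mod_cast hplen)]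
    simp [mpuF_zero]
  | succ j ih =>
    intro hj2
    have hj2' : (j : Int) < 2 * (p.length : Int) := by push_cast at hj2 ⊢; omega
    rw [Function.iterate_succ_apply', ih hj2']
    by_cases hjn : (j : Int) < (p.length : Int)
    · rw [if_pos hjn]
      rw [mpu_step_F p (j : Int) 1 hp (by positivity) hjn]
      by_cases hj1n : ((j : Nat) + 1 : Int) < (p.length : Int)
      · rw [if_pos (by push_cast; omega)]
        push_cast
        rfl
      · have hjeq : (j : Int) + 1 = (p.length : Int) := by push_cast at hj1n; omega
        rw [if_neg (by push_cast; omega)]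
        rw [hjeq, mpuF_wrap]
        push_cast
        rw [show ((j : Int) + 1 - (p.length : Int)) = 0 by omega]
    · rw [if_neg hjn]
      have h0 : 0 ≤ (j : Int) - (p.length : Int) := by omega
      have h1 : (j : Int) - (p.length : Int) < (p.length : Int) := by omega
      rw [mpu_step_F p _ (-1) hp h0 h1]
      rw [if_neg (by push_cast; omega)]
      push_cast
      congr 1
      omega

-- A's gather over range n equals mpuF, for 0 ≤ e < n
theorem gather_eq_mpuF (p : List Int) (s e : Int)
    (h0 : 0 ≤ e) (h1 : e < (p.length : Int)) :
    (PySem.List.pyRange 0 (p.length : Int) 1).map (fun i =>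
      if i - e < 0 then -s * PySem.List.pyGetD p ((p.length : Int) - e + i) 0
      else s * PySem.List.pyGetD p (i - e) 0)
    = mpuF p e s := by
  apply List.ext_getElem
  · simp [PySem.List.length_pyRange_one, mpuF]
    omega
  · intro k hk hk'
    have hkn : k < p.length := by
      simpa [PySem.List.length_pyRange_one] using hk
    rw [List.getElem_map, PySem.List.getElem_pyRange_one]
    by_cases hke : (k : Int) < e
    · have hidx : (0 : Int) + k - e < 0 := by omega
      rw [if_pos hidx]
      have hlen1 : k < ((p.drop ((p.length : Int) - e).toNat).map (fun x => -s * x)).length := by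
        simp; omega
      simp only [mpuF]
      rw [List.getElem_append_left hlen1, List.getElem_map, List.getElem_drop]
      have hge : (0:Int) ≤ (p.length : Int) - e + ((0:Int) + k) := by omega
      have hlt : (p.length : Int) - e + ((0:Int) + k) < (p.length : Int) := by omega
      rw [PySem.List.pyGetD_eq_getElem p 0 hge (by simpa using hlt)]
      congr 2
      omega
    · have hidx : ¬ ((0 : Int) + k - e < 0) := by omega
      rw [if_neg hidx]
      have hlen1 : ((p.drop ((p.length : Int) - e).toNat).map (fun x => -s * x)).length ≤ k := by
        simp; omega
      simp only [mpuF]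
      rw [List.getElem_append_right hlen1, List.getElem_map, List.getElem_take]
      have hge : (0:Int) ≤ (0:Int) + k - e := by omega
      have hlt : (0:Int) + k - e < (p.length : Int) := by omega
      rw [PySem.List.pyGetD_eq_getElem p 0 hge (by simpa using hlt)]
      congr 2
      simp
      omega

-- ===== VERDICT (by name: the statement is the Claim_ definition above) =====
theorem multiplicar_pot_u_spec : Claim_equal_multiplicar_pot_u := by
  intro p exp _ hpre
  unfold Spec_multiplicar_pot_u multiplicar_pot_u multiplicar_pot_u_alt
  dsimp only
  have hn : 0 < (p.length : Int) := by
    have : p.length ≠ 0 := fun h => hpre (List.eq_nil_of_length_eq_zero h)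
    omega
  have h2n : 0 < 2 * (p.length : Int) := by omega
  have hm0 : 0 ≤ PySem.Int.mod exp (2 * (p.length : Int)) := PySem.Int.mod_nonneg exp h2n
  have hm1 : PySem.Int.mod exp (2 * (p.length : Int)) < 2 * (p.length : Int) := PySem.Int.mod_lt exp h2n
  set e0 := PySem.Int.mod exp (2 * (p.length : Int)) with he0
  rw [foldl_const_iterate]
  have hlen : (PySem.List.pyRange 0 e0 1).length = e0.toNat := by
    rw [PySem.List.length_pyRange_one]; congr 1; omega
  rw [hlen]
  rw [iterate_mpu_step p hpre e0.toNat (by omega)]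
  have hcast : (e0.toNat : Int) = e0 := by omega
  rw [hcast]
  by_cases hc : e0 ≥ (p.length : Int)
  · rw [if_pos hc, if_neg (by omega)]
    exact gather_eq_mpuF p (-1) (e0 - (p.length : Int)) (by omega) (by omega)
  · rw [if_neg hc, if_pos (by omega)]
    exact gather_eq_mpuF p 1 e0 (by omega) (by omega)
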